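-- pv_equiv track=rewrite | github.com/vitalvightz/unlxck-gpt-webhook | fightcamp/stage2_payload.py | _next_training_days_after_effective_hard_spar
-- ===== SOURCE A (Python) =====
-- def _dedupe_preserve_order(values: list[str]) -> list[str]:
--     seen: set[str] = set()
--     result: list[str] = []
--     for value in values:
--         if value in seen:
--             continue
--         seen.add(value)
--         result.append(value)
--     return result
--
-- _WEEKDAY_ORDER = {
--     "monday": 0,
--     "tuesday": 1,
--     "wednesday": 2,
--     "thursday": 3,
--     "friday": 4,
--     "saturday": 5,
--     "sunday": 6,
-- }
--
-- def _ordered_weekdays(values: list[str]) -> list[str]: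
--     cleaned = _dedupe_preserve_order([str(value).strip() for value in values if str(value).strip()])
--     return sorted(cleaned, key=lambda day: (_WEEKDAY_ORDER.get(day.strip().lower(), 99), day.strip().lower()))
--
-- def _next_training_days_after_effective_hard_spar(
--     training_days: list[str],
--     effective_hard_days_list: set[str],
-- ) -> set[str]:
--     if not training_days or not effective_hard_days_list:
--         return set()
--
--     next_days: set[str] = set()
--     ordered_training_days = _ordered_weekdays(training_days)
--     for hard_day in effective_hard_days_list:
--         hard_day_index = _WEEKDAY_ORDER.get(str(hard_day).strip().lower(), -1)
--         if hard_day_index < 0: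
--             continue
--         next_day = next(
--             (
--                 day
--                 for day in ordered_training_days
--                 if _WEEKDAY_ORDER.get(str(day).strip().lower(), -1) > hard_day_index
--             ),
--             None,
--         )
--         if next_day:
--             next_days.add(next_day)
--     return next_days
-- ===== SOURCE B (Python) =====
-- def _dedupe_preserve_order(values: list[str]) -> list[str]:
--     seen: set[str] = set()
--     result: list[str] = []
--     for value in values:
--         if value in seen:
--             continue
--         seen.add(value)
--         result.append(value)
--     return result
--
-- _WEEKDAY_ORDER = {
--     "monday": 0,
--     "tuesday": 1,
--     "wednesday": 2,
--     "thursday": 3,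
--     "friday": 4,
--     "saturday": 5,
--     "sunday": 6,
-- }
--
-- def _ordered_weekdays(values: list[str]) -> list[str]:
--     cleaned = _dedupe_preserve_order([str(value).strip() for value in values if str(value).strip()])
--     return sorted(cleaned, key=lambda day: (_WEEKDAY_ORDER.get(day.strip().lower(), 99), day.strip().lower()))
--
-- def _next_training_days_after_effective_hard_spar(
--     training_days: list[str],
--     effective_hard_days_list: set[str],
-- ) -> set[str]:
--     if not training_days or not effective_hard_days_list:
--         return set()
--
--     ordered_training_days = _ordered_weekdays(training_days)
--     # Precompute: nxt[i] = first training day (in sorted order) whose weekday index is > i.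
--     # Walking the sorted list backwards and writing each day into all earlier slots leaves
--     # the first matching day in every slot.
--     nxt = [None] * 7
--     for day in reversed(ordered_training_days):
--         idx = _WEEKDAY_ORDER.get(day.strip().lower(), 99)
--         if idx < 7:
--             for j in range(idx):
--                 nxt[j] = day
--     next_days: set[str] = set()
--     for hard_day in effective_hard_days_list:
--         idx = _WEEKDAY_ORDER.get(str(hard_day).strip().lower(), -1)
--         if idx >= 0 and nxt[idx] is not None:
--             next_days.add(nxt[idx])
--     return next_days
-- ===== Notes on version B (the rewrite author's own statement) =====
-- stated objective: alternative
-- what changed: Instead of rescanning the sorted training-day list for every hard-spar day, B makes one backward pass over the sorted list to fill a 7-slot next-training-day-after-weekday table and then answers each hard day with a single table lookup.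
import Mathlib
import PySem

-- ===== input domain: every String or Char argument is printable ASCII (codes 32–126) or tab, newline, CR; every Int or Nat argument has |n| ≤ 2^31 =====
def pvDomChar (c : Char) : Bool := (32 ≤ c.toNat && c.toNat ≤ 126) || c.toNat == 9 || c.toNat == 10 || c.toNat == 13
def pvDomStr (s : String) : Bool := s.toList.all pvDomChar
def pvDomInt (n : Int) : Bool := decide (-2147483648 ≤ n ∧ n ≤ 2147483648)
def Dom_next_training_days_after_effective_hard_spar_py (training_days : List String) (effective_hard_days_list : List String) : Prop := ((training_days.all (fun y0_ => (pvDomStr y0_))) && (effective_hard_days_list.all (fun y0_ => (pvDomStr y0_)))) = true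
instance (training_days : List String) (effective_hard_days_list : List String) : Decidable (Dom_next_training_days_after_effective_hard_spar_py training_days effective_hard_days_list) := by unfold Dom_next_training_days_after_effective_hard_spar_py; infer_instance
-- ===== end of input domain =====

-- B replaces A's per-hard-day linear rescan of the sorted training list by one backward
-- pass filling a 7-slot "next training day after weekday i" table, then one table lookup
-- per hard day (objective: alternative decomposition; same returned set).

-- ===== PORT A =====
-- module-level helpers (shared: in Python both A and B call the same module helpers)
def pvWK : PySem.Dict String Int :=
  PySem.Dict.ofList [("monday", 0), ("tuesday", 1), ("wednesday", 2), ("thursday", 3),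
                     ("friday", 4), ("saturday", 5), ("sunday", 6)]

-- day.strip().lower(), the key expression used throughout
def pvLow (s : String) : String := PySem.Str.lower (PySem.Str.strip s)

-- _dedupe_preserve_order: loop with a seen-set and a result list
def dedupe_preserve_order (values : List String) : List String :=
  (values.foldl
    (fun (st : PySem.Set String × List String) value =>
      if value ∈ st.1 then st
      else (PySem.Set.add st.1 value, st.2 ++ [value]))
    (PySem.Set.empty, [])).2

-- _ordered_weekdays
def ordered_weekdays (values : List String) : List String :=
  let cleaned := dedupe_preserve_order
    (values.filterMap (fun value =>
      let s := PySem.Str.strip value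
      if s = "" then none else some s))
  PySem.List.sorted2 cleaned
    (fun day => PySem.Dict.getD pvWK (pvLow day) 99)
    (fun day => pvLow day)

def next_training_days_after_effective_hard_spar_py (training_days : List String) (effective_hard_days_list : List String) : List String :=
  if training_days = [] ∨ effective_hard_days_list = [] then []
  else
    let ordered_training_days := ordered_weekdays training_days
    effective_hard_days_list.foldl
      (fun (next_days : PySem.Set String) hard_day =>
        let hard_day_index := PySem.Dict.getD pvWK (pvLow hard_day) (-1)
        if hard_day_index < 0 then next_days
        else
          match ordered_training_days.find?
              (fun day => decide (PySem.Dict.getD pvWK (pvLow day) (-1) > hard_day_index)) with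
          | some next_day => if next_day ≠ "" then PySem.Set.add next_days next_day else next_days
          | none => next_days)
      PySem.Set.empty

-- ===== PORT B =====
def next_training_days_after_effective_hard_spar_py_alt (training_days : List String) (effective_hard_days_list : List String) : List String :=
  if training_days = [] ∨ effective_hard_days_list = [] then []
  else
    let ordered_training_days := ordered_weekdays training_days
    -- nxt[j] = first sorted training day with weekday index > j, by one backward pass
    let nxt : List (Option String) :=
      ordered_training_days.reverse.foldl
        (fun nxt day =>
          let idx := PySem.Dict.getD pvWK (pvLow day) 99
          if idx < 7 then
            (PySem.List.pyRange 0 idx 1).foldl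
              (fun nxt j => PySem.List.pySetD nxt j (some day)) nxt
          else nxt)
        (List.replicate 7 none)
    effective_hard_days_list.foldl
      (fun (next_days : PySem.Set String) hard_day =>
        let idx := PySem.Dict.getD pvWK (pvLow hard_day) (-1)
        if idx ≥ 0 then
          match PySem.List.pyGetD nxt idx none with
          | some d => PySem.Set.add next_days d
          | none => next_days
        else next_days)
      PySem.Set.empty

-- ===== PRECONDITION & SPEC =====
def Spec_next_training_days_after_effective_hard_spar_py (training_days : List String) (effective_hard_days_list : List String) (out : List String) : Prop := out = next_training_days_after_effective_hard_spar_py_alt training_days effective_hard_days_list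
instance (training_days : List String) (effective_hard_days_list : List String) (out : List String) : Decidable (Spec_next_training_days_after_effective_hard_spar_py training_days effective_hard_days_list out) := by unfold Spec_next_training_days_after_effective_hard_spar_py; infer_instance

-- ===== CLAIM (what is proved, stated in full; the proofs are below) =====
def Claim_equal_next_training_days_after_effective_hard_spar_py : Prop := ∀ (training_days : List String) (effective_hard_days_list : List String), Dom_next_training_days_after_effective_hard_spar_py training_days effective_hard_days_list → Spec_next_training_days_after_effective_hard_spar_py training_days effective_hard_days_list (next_training_days_after_effective_hard_spar_py training_days effective_hard_days_list)

-- ===== LEMMAS AND PROOFS =====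

-- the weekday dictionary stores exactly the values 0..6
lemma wk_cases (s : String) :
    PySem.Dict.get? pvWK s = none ∨
    ∃ v : Int, PySem.Dict.get? pvWK s = some v ∧ 0 ≤ v ∧ v < 7 := by
  have h : pvWK = PySem.Dict.mk [("monday", 0), ("tuesday", 1), ("wednesday", 2), ("thursday", 3),
                     ("friday", 4), ("saturday", 5), ("sunday", 6)] := by decide
  rw [h]
  simp only [PySem.Dict.get?_mk_cons]
  split_ifs
  all_goals first
    | exact Or.inr ⟨_, rfl, by norm_num⟩
    | exact Or.inl (by simp [PySem.Dict.get?])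

-- in-range writes keep the table length
lemma writes_length {α : Type} (v : α) (l : List Int) (nxt : List α) :
    (l.foldl (fun n i => PySem.List.pySetD n i v) nxt).length = nxt.length := by
  induction l generalizing nxt with
  | nil => rfl
  | cons a t iht => simp [List.foldl_cons, iht, PySem.List.length_pySetD]

-- the inner write loop: slot j holds `some day` iff j < m, else its old value
lemma write_loop (day : String) (m : Nat) (nxt : List (Option String)) (j : Nat)
    (hj : j < nxt.length) (hm : m ≤ nxt.length) :
    PySem.List.pyGetD
      ((PySem.List.pyRange 0 (m : Int) 1).foldl
        (fun n i => PySem.List.pySetD n i (some day)) nxt) (j : Int) none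
    = if j < m then some day else PySem.List.pyGetD nxt (j : Int) none := by
  induction m generalizing nxt with
  | zero => simp [PySem.List.pyRange_one_eq_nil]
  | succ m ih =>
    have hcast : ((m + 1 : Nat) : Int) = (m : Int) + 1 := by push_cast; ring
    rw [hcast, PySem.List.pyRange_one_succ_right (by positivity), List.foldl_append]
    simp only [List.foldl_cons, List.foldl_nil]
    rw [PySem.List.pyGetD_pySetD_natCast _ m j _ _ (by rw [writes_length]; omega)]
    rw [ih nxt hj (by omega)]
    split_ifs <;> first | rfl | omega

-- the backward pass keeps the 7-slot table's length
lemma build_length (l : List String) (init : List (Option String)) :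
    (l.foldl
      (fun nxt day =>
        let idx := PySem.Dict.getD pvWK (pvLow day) 99
        if idx < 7 then
          (PySem.List.pyRange 0 idx 1).foldl
            (fun nxt j => PySem.List.pySetD nxt j (some day)) nxt
        else nxt)
      init).length = init.length := by
  induction l generalizing init with
  | nil => rfl
  | cons d t ih =>
    simp only [List.foldl_cons]
    split
    · rw [ih, writes_length]
    · rw [ih]

-- the backward pass computes exactly A's "first later training day" search
lemma build_spec (l : List String) (j : Nat) (hj : j < 7) :
    PySem.List.pyGetD
      (l.reverse.foldl
        (fun nxt day =>
          let idx := PySem.Dict.getD pvWK (pvLow day) 99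
          if idx < 7 then
            (PySem.List.pyRange 0 idx 1).foldl
              (fun nxt j => PySem.List.pySetD nxt j (some day)) nxt
          else nxt)
        (List.replicate 7 none)) (j : Int) none
    = l.find? (fun day => decide (PySem.Dict.getD pvWK (pvLow day) (-1) > (j : Int))) := by
  induction l with
  | nil =>
    simp only [List.reverse_nil, List.foldl_nil, List.find?_nil]
    rw [PySem.List.pyGetD_natCast]
    interval_cases j <;> rfl
  | cons d t ih =>
    rw [List.reverse_cons, List.foldl_append]
    set F := t.reverse.foldl
        (fun nxt day =>
          let idx := PySem.Dict.getD pvWK (pvLow day) 99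
          if idx < 7 then
            (PySem.List.pyRange 0 idx 1).foldl
              (fun nxt j => PySem.List.pySetD nxt j (some day)) nxt
          else nxt)
        (List.replicate 7 none) with hF
    have hFlen : F.length = 7 := by
      rw [hF, build_length]; simp
    simp only [List.foldl_cons, List.foldl_nil, List.find?_cons]
    rcases wk_cases (pvLow d) with hnone | ⟨v, hv, hv0, hv7⟩
    · have h99 : PySem.Dict.getD pvWK (pvLow d) 99 = 99 := by
        simp [PySem.Dict.getD, hnone]
      have hm1 : PySem.Dict.getD pvWK (pvLow d) (-1) = -1 := by
        simp [PySem.Dict.getD, hnone]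
      rw [h99, hm1]
      simp only [show ¬ ((99:Int) < 7) by norm_num, if_false]
      have : (decide ((-1:Int) > (j:Nat))) = false := by
        simp
      rw [this]
      exact ih
    · have h99 : PySem.Dict.getD pvWK (pvLow d) 99 = v := by
        simp [PySem.Dict.getD, hv]
      have hm1 : PySem.Dict.getD pvWK (pvLow d) (-1) = v := by
        simp [PySem.Dict.getD, hv]
      rw [h99, hm1]
      rw [if_pos hv7]
      have hvcast : ((v.toNat : Nat) : Int) = v := Int.toNat_of_nonneg hv0
      rw [← hvcast]
      rw [write_loop d v.toNat F j (by omega) (by omega)]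
      by_cases hgt : v > (j : Int)
      · rw [if_pos (by omega)]
        rw [hvcast] at *
        simp [hgt]
      · rw [if_neg (by omega)]
        have : (decide (v > ((j:Nat):Int))) = false := by simpa using hgt
        rw [hvcast] at *
        simp only [this]
        exact ih

-- every element of the accumulated dedupe result came from the accumulator or the list
lemma mem_dedupe_aux (l : List String) (seen : PySem.Set String) (res : List String) (x : String)
    (hx : x ∈ (l.foldl
      (fun (st : PySem.Set String × List String) value =>
        if value ∈ st.1 then st
        else (PySem.Set.add st.1 value, st.2 ++ [value]))
      (seen, res)).2) : x ∈ res ∨ x ∈ l := by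
  induction l generalizing seen res with
  | nil => simp only [List.foldl_nil] at hx; exact Or.inl hx
  | cons a t ih =>
    simp only [List.foldl_cons] at hx
    split at hx
    · rcases ih _ _ hx with h | h
      · exact Or.inl h
      · exact Or.inr (List.mem_cons_of_mem _ h)
    · rcases ih _ _ hx with h | h
      · rcases List.mem_append.1 h with h | h
        · exact Or.inl h
        · simp at h; subst h; exact Or.inr List.mem_cons_self
      · exact Or.inr (List.mem_cons_of_mem _ h)

-- every cleaned training day is a nonempty string
lemma mem_ordered_ne_empty (vs : List String) (d : String)
    (hd : d ∈ ordered_weekdays vs) : d ≠ "" := by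
  unfold ordered_weekdays at hd
  have h1 : d ∈ dedupe_preserve_order
      (vs.filterMap (fun value =>
        let s := PySem.Str.strip value
        if s = "" then none else some s)) :=
    (PySem.List.sorted2_perm _ _ _ _).mem_iff.1 hd
  unfold dedupe_preserve_order at h1
  rcases mem_dedupe_aux _ _ _ _ h1 with h | h
  · simp at h
  · rcases List.mem_filterMap.1 h with ⟨v, _, hv⟩
    simp only at hv
    split at hv
    · exact absurd hv (by simp)
    · rename_i hne
      intro h0; apply hne; rw [Option.some_inj.1 hv]; exact h0

-- the two programs return the same list
lemma main_eq (training_days : List String) (effective_hard_days_list : List String) :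
    next_training_days_after_effective_hard_spar_py training_days effective_hard_days_list
    = next_training_days_after_effective_hard_spar_py_alt training_days effective_hard_days_list := by
  unfold next_training_days_after_effective_hard_spar_py
    next_training_days_after_effective_hard_spar_py_alt
  by_cases hc : training_days = [] ∨ effective_hard_days_list = []
  · rw [if_pos hc, if_pos hc]
  · rw [if_neg hc, if_neg hc]
    apply PySem.List.foldl_congr_mem
    intro acc hd _
    dsimp only
    rcases wk_cases (pvLow hd) with hnone | ⟨v, hv, hv0, hv7⟩
    · have hm1 : PySem.Dict.getD pvWK (pvLow hd) (-1) = -1 := by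
        simp [PySem.Dict.getD, hnone]
      rw [hm1]
      norm_num
    · have hm1 : PySem.Dict.getD pvWK (pvLow hd) (-1) = v := by
        simp [PySem.Dict.getD, hv]
      rw [hm1]
      rw [if_neg (by omega), if_pos (by omega)]
      have hvcast : ((v.toNat : Nat) : Int) = v := Int.toNat_of_nonneg hv0
      rw [← hvcast, build_spec _ v.toNat (by omega), hvcast]
      cases hfind : (ordered_weekdays training_days).find?
          (fun day => decide (PySem.Dict.getD pvWK (pvLow day) (-1) > v)) with
      | none => rfl
      | some dd =>
        have : dd ≠ "" :=
          mem_ordered_ne_empty _ _ (List.mem_of_find?_eq_some hfind)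
        simp only []
        exact if_pos this

-- ===== VERDICT (by name: the statement is the Claim_ definition above) =====
theorem next_training_days_after_effective_hard_spar_py_spec : Claim_equal_next_training_days_after_effective_hard_spar_py := by
  intro training_days effective_hard_days_list _
  exact main_eq training_days effective_hard_days_list
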